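-- pv_equiv track=rewrite | github.com/huggingface/nanotron | src/nanotron/data/nemo_dataset/__init__.py | _num_epochs
-- ===== SOURCE A (Python) =====
-- def _num_epochs(tokens_per_epoch: int, seq_length: int, num_samples: int, add_extra_token: int = 1) -> int:
--     """Based on number of samples and sequence length, calculate how many
--     epochs will be needed."""
--     num_epochs = 0
--     total_tokens = 0
--     while True:
--         num_epochs += 1
--         total_tokens += tokens_per_epoch
--         # -1 is because we need to retrieve seq_length + 1 token each time
--         # but the last token will overlap with the first token of the next
--         # sample except for the last sample.
--         if ((total_tokens - add_extra_token) // seq_length) >= num_samples: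
--             return num_epochs
-- ===== SOURCE B (Python) =====
-- def _num_epochs(tokens_per_epoch: int, seq_length: int, num_samples: int, add_extra_token: int = 1) -> int:
--     """Closed form: smallest positive k with (k*tokens_per_epoch - add_extra_token)
--     // seq_length >= num_samples, i.e. ceil((num_samples*seq_length + add_extra_token)
--     / tokens_per_epoch), at least 1."""
--     need = num_samples * seq_length + add_extra_token
--     return max(1, -(-need // tokens_per_epoch))
-- ===== Notes on version B (the rewrite author's own statement) =====
-- stated objective: faster
-- what changed: Replaced the epoch-counting while-loop by the closed form max(1, ceil((num_samples*seq_length + add_extra_token)/tokens_per_epoch)), valid on the natural domain tokens_per_epoch >= 1 and seq_length >= 1.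
-- outside the precondition, e.g. on _num_epochs(1, -2, -5, 0): A returns 1, B returns 10; on _num_epochs(-3, 2, -5, 0): A returns 1, B returns 4
import Mathlib
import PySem

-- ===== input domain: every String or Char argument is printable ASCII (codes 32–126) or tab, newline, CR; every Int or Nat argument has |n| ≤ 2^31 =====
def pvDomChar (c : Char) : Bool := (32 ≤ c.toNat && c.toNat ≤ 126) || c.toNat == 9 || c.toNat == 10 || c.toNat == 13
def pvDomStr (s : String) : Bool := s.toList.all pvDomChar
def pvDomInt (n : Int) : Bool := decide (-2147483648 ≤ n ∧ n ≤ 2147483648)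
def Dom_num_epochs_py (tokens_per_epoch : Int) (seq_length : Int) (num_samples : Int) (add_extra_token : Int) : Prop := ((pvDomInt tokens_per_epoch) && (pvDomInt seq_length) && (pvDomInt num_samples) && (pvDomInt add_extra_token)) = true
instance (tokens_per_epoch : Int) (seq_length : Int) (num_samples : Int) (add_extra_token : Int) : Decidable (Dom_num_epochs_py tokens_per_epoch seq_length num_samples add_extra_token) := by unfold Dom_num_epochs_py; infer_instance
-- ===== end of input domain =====

-- B replaces A's one-epoch-at-a-time counting loop by the O(1) closed form
-- max(1, ceil((num_samples*seq_length + add_extra_token)/tokens_per_epoch)); equivalence is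
-- proved on the natural domain tokens_per_epoch ≥ 1 ∧ seq_length ≥ 1 (Pre_).

-- ===== PORT A =====
-- A's 'while True' loop, with fuel making it total; under Pre_ the fuel (2^63) is never
-- exhausted (proved below), so the fuel-0 branch is unreachable there.
def numEpochsLoopA (tokens_per_epoch : Int) (seq_length : Int) (num_samples : Int)
    (add_extra_token : Int) (num_epochs : Int) (total_tokens : Int) (fuel : Nat) : Int :=
  match fuel with
  | 0 => num_epochs
  | Nat.succ fuel =>
    let num_epochs := num_epochs + 1
    let total_tokens := total_tokens + tokens_per_epoch
    if num_samples ≤ PySem.Int.floordiv (total_tokens - add_extra_token) seq_length then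
      num_epochs
    else
      numEpochsLoopA tokens_per_epoch seq_length num_samples add_extra_token num_epochs total_tokens fuel

def num_epochs_py (tokens_per_epoch : Int) (seq_length : Int) (num_samples : Int) (add_extra_token : Int) : Int :=
  numEpochsLoopA tokens_per_epoch seq_length num_samples add_extra_token 0 0 9223372036854775808

-- ===== PORT B =====
def num_epochs_py_alt (tokens_per_epoch : Int) (seq_length : Int) (num_samples : Int) (add_extra_token : Int) : Int :=
  let need := num_samples * seq_length + add_extra_token
  max 1 (-(PySem.Int.floordiv (-need) tokens_per_epoch))

-- ===== PRECONDITION & SPEC =====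
-- Pre_ restricts to the function's natural domain (a positive number of tokens per epoch and a
-- positive sequence length): outside it A either raises ZeroDivisionError (seq_length = 0),
-- loops forever, or returns a value produced by floor division with a negative divisor that no
-- caller would specify.
def Pre_num_epochs_py (tokens_per_epoch : Int) (seq_length : Int) (num_samples : Int) (add_extra_token : Int) : Prop :=
  1 ≤ tokens_per_epoch ∧ 1 ≤ seq_length
instance (tokens_per_epoch : Int) (seq_length : Int) (num_samples : Int) (add_extra_token : Int) : Decidable (Pre_num_epochs_py tokens_per_epoch seq_length num_samples add_extra_token) := by unfold Pre_num_epochs_py; infer_instance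

def pvWitness_num_epochs_py : Int × Int × Int × Int := (1024, 512, 10, 1)

def Spec_num_epochs_py (tokens_per_epoch : Int) (seq_length : Int) (num_samples : Int) (add_extra_token : Int) (out : Int) : Prop := out = num_epochs_py_alt tokens_per_epoch seq_length num_samples add_extra_token
instance (tokens_per_epoch : Int) (seq_length : Int) (num_samples : Int) (add_extra_token : Int) (out : Int) : Decidable (Spec_num_epochs_py tokens_per_epoch seq_length num_samples add_extra_token out) := by unfold Spec_num_epochs_py; infer_instance

-- ===== CLAIM (what is proved, stated in full; the proofs are below) =====
def Claim_equal_num_epochs_py : Prop := ∀ (tokens_per_epoch : Int) (seq_length : Int) (num_samples : Int) (add_extra_token : Int), Dom_num_epochs_py tokens_per_epoch seq_length num_samples add_extra_token → Pre_num_epochs_py tokens_per_epoch seq_length num_samples add_extra_token → Spec_num_epochs_py tokens_per_epoch seq_length num_samples add_extra_token (num_epochs_py tokens_per_epoch seq_length num_samples add_extra_token)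

-- ===== LEMMAS AND PROOFS =====

-- The loop invariant: starting at epoch counter k with total_tokens = k*tpe, the loop returns
-- K := max 1 (ceil(need/tpe)), provided k < K and there is at least K - k fuel.
lemma numEpochsLoopA_eq (tpe s n a : Int) (ht : 1 ≤ tpe) (hs : 1 ≤ s) :
    ∀ (fuel : Nat) (k : Int), 0 ≤ k →
      k < max 1 (-(PySem.Int.floordiv (-(n * s + a)) tpe)) →
      (max 1 (-(PySem.Int.floordiv (-(n * s + a)) tpe)) - k).toNat ≤ fuel →
      numEpochsLoopA tpe s n a k (k * tpe) fuel
        = max 1 (-(PySem.Int.floordiv (-(n * s + a)) tpe)) := by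
  intro fuel
  set need : Int := n * s + a with hneed
  set C : Int := -(PySem.Int.floordiv (-need) tpe) with hC
  have hCb : (C - 1) * tpe < need ∧ need ≤ C * tpe :=
    (PySem.Int.neg_floordiv_neg_eq_iff_of_pos (a := need) (b := tpe) (q := C)
      (by omega)).mp rfl
  induction fuel with
  | zero => intro k hk0 hkK hfuel; omega
  | succ fuel ih =>
    intro k hk0 hkK hfuel
    have hcond : (n ≤ PySem.Int.floordiv (k * tpe + tpe - a) s) ↔ need ≤ (k + 1) * tpe := by
      rw [PySem.Int.le_floordiv_iff_mul_le (by omega)]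
      constructor <;> intro h <;> nlinarith
    by_cases h : n ≤ PySem.Int.floordiv (k * tpe + tpe - a) s
    · -- loop stops at epoch k+1; show k+1 = max 1 C
      have hle : need ≤ (k + 1) * tpe := hcond.mp h
      have hCk : C ≤ k + 1 := by
        by_contra hc
        have h1 : k + 1 ≤ C - 1 := by omega
        have h2 : (k + 1) * tpe ≤ (C - 1) * tpe :=
          mul_le_mul_of_nonneg_right h1 (by omega)
        omega
      have : numEpochsLoopA tpe s n a k (k * tpe) (fuel + 1) = k + 1 := by
        simp only [numEpochsLoopA, h, if_pos]
      omega
    · -- loop continues: k+1 < C, recurse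
      have hgt : (k + 1) * tpe < need := by
        rcases lt_or_ge ((k + 1) * tpe) need with h' | h'
        · exact h'
        · exact absurd (hcond.mpr h') h
      have hkC : k + 1 < C := by
        have : (k + 1) * tpe < C * tpe := by omega
        exact lt_of_mul_lt_mul_right this (by omega)
      have hrec := ih (k + 1) (by omega) (by omega) (by omega)
      have hstep : numEpochsLoopA tpe s n a k (k * tpe) (fuel + 1)
          = numEpochsLoopA tpe s n a (k + 1) (k * tpe + tpe) fuel := by
        simp only [numEpochsLoopA, h, if_neg, not_false_iff]
      rw [hstep]
      have : k * tpe + tpe = (k + 1) * tpe := by ring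
      rw [this]
      exact hrec

-- ===== VERDICT (by name: the statement is the Claim_ definition above) =====
theorem num_epochs_py_spec : Claim_equal_num_epochs_py := by
  intro tpe s n a hdom hpre
  obtain ⟨ht, hs⟩ := hpre
  unfold Spec_num_epochs_py num_epochs_py num_epochs_py_alt
  simp only [Dom_num_epochs_py, pvDomInt, Bool.and_eq_true, decide_eq_true_eq] at hdom
  obtain ⟨⟨⟨hT, hS⟩, hN⟩, hA⟩ := hdom
  set need : Int := n * s + a with hneed
  set C : Int := -(PySem.Int.floordiv (-need) tpe) with hC
  have hCb : (C - 1) * tpe < need ∧ need ≤ C * tpe :=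
    (PySem.Int.neg_floordiv_neg_eq_iff_of_pos (a := need) (b := tpe) (q := C)
      (by omega)).mp rfl
  -- bound C by need (the loop count fits in the fuel)
  have hneed_ub : need ≤ 4611686020574871552 := by
    have h1 : (0:Int) ≤ (2147483648 - n) * (2147483648 + s) :=
      mul_nonneg (by omega) (by omega)
    have h2 : (0:Int) ≤ (2147483648 + n) * (2147483648 - s) :=
      mul_nonneg (by omega) (by omega)
    nlinarith
  have hCub : C ≤ 4611686020574871552 := by
    by_cases hC2 : C ≤ 1
    · omega
    · have h1 : (1:Int) ≤ C - 1 := by omega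
      have h2 : C - 1 ≤ (C - 1) * tpe := le_mul_of_one_le_right (by omega) ht
      omega
  have hCeq : max 1 (-(PySem.Int.floordiv (-(n * s + a)) tpe)) = max 1 C := by
    rw [hC, hneed]
  have h0 := numEpochsLoopA_eq tpe s n a ht hs 9223372036854775808 0 le_rfl
    (by rw [hCeq]; omega) (by rw [hCeq]; omega)
  rw [zero_mul, hCeq] at h0
  exact h0
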